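-- pv_equiv track=rewrite | github.com/ywatanabe1989/screen-manager | tests/test_state_detection.py | analyze_output_for_state
-- ===== SOURCE A (Python) =====
-- def analyze_output_for_state(output):
--     """Analyze captured output to detect current state."""
--
--     # Look for prompts in reverse order (most recent first)
--     lines = output.strip().split('\n')
--
--     for line in reversed(lines):
--         line = line.strip()
--
--         # Check for ipdb prompt
--         if 'ipdb>' in line:
--             return "ipdb", line
--
--         # Check for IPython prompt
--         if line.startswith('In [') and ']:' in line:
--             return "ipython", line
--
--         # Check for Python prompt
--         if line.startswith('>>>') or line.startswith('...'):
--             return "python", line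
--
--         # Check for shell prompt
--         if '$' in line and not line.startswith('#'):
--             return "shell", line
--
--     return "unknown", ""
-- ===== SOURCE B (Python) =====
-- def _classify(line):
--     """Classify one stripped line; None if it matches no prompt pattern."""
--     if 'ipdb>' in line:
--         return "ipdb"
--     if line.startswith('In [') and ']:' in line:
--         return "ipython"
--     if line.startswith('>>>') or line.startswith('...'):
--         return "python"
--     if '$' in line and not line.startswith('#'):
--         return "shell"
--     return None
--
--
-- def analyze_output_for_state(output):
--     """Analyze captured output to detect current state (forward scan, keep last match)."""
--     result = ("unknown", "")
--     for raw in output.strip().split('\n'):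
--         line = raw.strip()
--         state = _classify(line)
--         if state is not None:
--             result = (state, line)
--     return result
-- ===== Notes on version B (the rewrite author's own statement) =====
-- stated objective: alternative
-- what changed: Replaces the reverse scan with early return by a forward scan over the lines in original order that classifies each stripped line with a separate helper and overwrites the result on every match, returning it after the loop (last forward match = first reverse match).
import Mathlib
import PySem

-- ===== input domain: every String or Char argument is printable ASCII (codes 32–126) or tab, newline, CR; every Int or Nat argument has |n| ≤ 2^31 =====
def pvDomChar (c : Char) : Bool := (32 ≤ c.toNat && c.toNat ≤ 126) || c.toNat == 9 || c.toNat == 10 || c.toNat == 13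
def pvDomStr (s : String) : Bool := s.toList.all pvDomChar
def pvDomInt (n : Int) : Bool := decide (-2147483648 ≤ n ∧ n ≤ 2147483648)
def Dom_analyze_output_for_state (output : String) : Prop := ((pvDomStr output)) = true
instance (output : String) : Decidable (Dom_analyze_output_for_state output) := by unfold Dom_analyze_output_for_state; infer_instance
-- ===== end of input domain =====

-- B replaces A's reverse scan with early return by a forward scan that classifies each
-- stripped line via a helper and overwrites the result on every match (alternative decomposition).


-- ===== PORT A =====
-- loop 'for line in reversed(lines)' with early returns, as structural recursion
def analyzeLoopA : List String → String × String
  | [] => ("unknown", "")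
  | ln :: rest =>
    let line := PySem.Str.strip ln
    if PySem.Str.isIn "ipdb>" line then ("ipdb", line)
    else if PySem.Str.startswith line "In [" && PySem.Str.isIn "]:" line then ("ipython", line)
    else if PySem.Str.startswith line ">>>" || PySem.Str.startswith line "..." then ("python", line)
    else if PySem.Str.isIn "$" line && !PySem.Str.startswith line "#" then ("shell", line)
    else analyzeLoopA rest

def analyze_output_for_state (output : String) : String × String :=
  -- split? with sep "\n" never returns none; getD [] is unreachable
  let lines := (PySem.Str.split? (PySem.Str.strip output) "\n").getD []
  analyzeLoopA lines.reverse

-- ===== PORT B =====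
-- helper _classify of Source B
def classifyLine (line : String) : Option String :=
  if PySem.Str.isIn "ipdb>" line then some "ipdb"
  else if PySem.Str.startswith line "In [" && PySem.Str.isIn "]:" line then some "ipython"
  else if PySem.Str.startswith line ">>>" || PySem.Str.startswith line "..." then some "python"
  else if PySem.Str.isIn "$" line && !PySem.Str.startswith line "#" then some "shell"
  else none

def analyze_output_for_state_alt (output : String) : String × String :=
  let lines := (PySem.Str.split? (PySem.Str.strip output) "\n").getD []
  lines.foldl (fun result raw =>
      let line := PySem.Str.strip raw
      match classifyLine line with
      | some st => (st, line)
      | none => result)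
    ("unknown", "")

-- ===== PRECONDITION & SPEC =====
def Spec_analyze_output_for_state (output : String) (out : String × String) : Prop := out = analyze_output_for_state_alt output
instance (output : String) (out : String × String) : Decidable (Spec_analyze_output_for_state output out) := by unfold Spec_analyze_output_for_state; infer_instance

-- ===== CLAIM (what is proved, stated in full; the proofs are below) =====
def Claim_equal_analyze_output_for_state : Prop := ∀ (output : String), Dom_analyze_output_for_state output → Spec_analyze_output_for_state output (analyze_output_for_state output)

-- ===== LEMMAS AND PROOFS =====

-- A's loop step is B's classifier
lemma analyzeLoopA_cons (ln : String) (rest : List String) :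
    analyzeLoopA (ln :: rest) =
      match classifyLine (PySem.Str.strip ln) with
      | some st => (st, PySem.Str.strip ln)
      | none => analyzeLoopA rest := by
  simp only [analyzeLoopA, classifyLine]
  split_ifs <;> rfl

-- first match scanning the reverse = last match scanning forward
lemma loop_eq_foldl (l : List String) :
    analyzeLoopA l.reverse =
      l.foldl (fun result raw =>
          match classifyLine (PySem.Str.strip raw) with
          | some st => (st, PySem.Str.strip raw)
          | none => result)
        ("unknown", "") := by
  induction l using List.reverseRecOn with
  | nil => rfl
  | append_singleton l x ih =>
      rw [List.reverse_append, List.reverse_singleton, List.singleton_append,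
        analyzeLoopA_cons, List.foldl_append, List.foldl_cons, List.foldl_nil, ← ih]

-- ===== VERDICT (by name: the statement is the Claim_ definition above) =====
theorem analyze_output_for_state_spec : Claim_equal_analyze_output_for_state := by
  intro output _
  unfold Spec_analyze_output_for_state analyze_output_for_state analyze_output_for_state_alt
  exact loop_eq_foldl _
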